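-- pv_equiv track=rewrite | github.com/cryptolake/holbertonschool-machine_learning | supervised_learning/0x10-nlp_metrics/1-ngram_bleu.py | transform_multigram
-- ===== SOURCE A (Python) =====
-- def transform_multigram(sentence, n):
--     """Transform list of words into list of tuples of words."""
--     new_sentence = []
--     for i in range(len(sentence)-n+1):
--         grams = []
--         for j in range(i, i+n):
--             grams.append(sentence[j])
--         new_sentence.append(tuple(grams))
--
--     return new_sentence
-- ===== SOURCE B (Python) =====
-- def transform_multigram(sentence, n):
--     """Transform list of words into list of tuples of words."""
--     if n > len(sentence):
--         return []
--     return list(zip(*(sentence[i:] for i in range(n))))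
-- ===== Notes on version B (the rewrite author's own statement) =====
-- stated objective: idiomatic
-- what changed: Replaces the nested index-window loops with a transpose of n shifted views (zip of sentence[i:] for i in range(n), after an early [] when n exceeds the sentence length), relying on zip's truncation instead of window-index arithmetic.
-- outside the precondition, e.g. on transform_multigram(['a'], 0): A returns [(), ()], B returns []; on transform_multigram(['a'], -1): A returns [(), (), ()], B returns []
import Mathlib
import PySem

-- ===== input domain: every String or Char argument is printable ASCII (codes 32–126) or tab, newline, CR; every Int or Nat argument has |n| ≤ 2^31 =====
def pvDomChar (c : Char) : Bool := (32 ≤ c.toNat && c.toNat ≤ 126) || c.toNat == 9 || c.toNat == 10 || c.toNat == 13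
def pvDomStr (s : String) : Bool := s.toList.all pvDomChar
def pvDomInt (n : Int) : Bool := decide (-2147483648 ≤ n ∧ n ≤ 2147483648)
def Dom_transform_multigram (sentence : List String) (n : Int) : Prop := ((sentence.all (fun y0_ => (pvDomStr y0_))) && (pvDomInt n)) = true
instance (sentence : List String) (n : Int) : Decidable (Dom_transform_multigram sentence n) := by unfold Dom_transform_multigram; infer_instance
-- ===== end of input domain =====

-- B builds the n-grams as a transpose of n shifted views (zip of sentence[i:]) instead of
-- nested index-window loops; objective: idiomatic. Return-value equivalence on n ≥ 1.

-- ===== PORT A =====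
def transform_multigram (sentence : List String) (n : Int) : List (List String) :=
  (PySem.List.pyRange 0 ((sentence.length : Int) - n + 1) 1).foldl
    (fun new_sentence i =>
      new_sentence ++
        [(PySem.List.pyRange i (i + n) 1).foldl
          (fun grams j => grams ++ [PySem.List.pyGetD sentence j ""]) []]) []

-- ===== PORT B =====
-- zip(*lists): truncating transpose — rows up to the minimum length of the zipped lists
def pyZipStar (ls : List (List String)) : List (List String) :=
  match (ls.map List.length).min? with
  | none => []
  | some m => (List.range m).map (fun k => ls.map (fun xs => xs.getD k ""))

def transform_multigram_alt (sentence : List String) (n : Int) : List (List String) :=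
  if (sentence.length : Int) < n then []
  else
    pyZipStar ((PySem.List.pyRange 0 n 1).map
      (fun i => PySem.List.slice sentence (some i) none))

-- ===== PRECONDITION & SPEC =====
-- Pre_ excludes n ≤ 0 — a corner where no n-gram order is specified and both outputs are
-- defensible: A returns len(sentence)-n+1 empty tuples (its range arithmetic), B returns [].
def Pre_transform_multigram (sentence : List String) (n : Int) : Prop := 1 ≤ n
instance (sentence : List String) (n : Int) : Decidable (Pre_transform_multigram sentence n) := by unfold Pre_transform_multigram; infer_instance
def pvWitness_transform_multigram : List String × Int := (["the", "cat", "sat"], 2)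

def Spec_transform_multigram (sentence : List String) (n : Int) (out : List (List String)) : Prop := out = transform_multigram_alt sentence n
instance (sentence : List String) (n : Int) (out : List (List String)) : Decidable (Spec_transform_multigram sentence n out) := by unfold Spec_transform_multigram; infer_instance

-- ===== CLAIM (what is proved, stated in full; the proofs are below) =====
def Claim_equal_transform_multigram : Prop := ∀ (sentence : List String) (n : Int), Dom_transform_multigram sentence n → Pre_transform_multigram sentence n → Spec_transform_multigram sentence n (transform_multigram sentence n)

-- ===== LEMMAS AND PROOFS =====

-- minimum of the shifted-view lengths: min over k < nn of (len - k) is len - (nn - 1)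
lemma min?_range_sub (len nn : Nat) (h : 1 ≤ nn) :
    ((List.range nn).map (fun k => len - k)).min? = some (len - (nn - 1)) := by
  rw [List.min?_eq_some_iff]
  constructor
  · exact List.mem_map.2 ⟨nn - 1, List.mem_range.2 (by omega), rfl⟩
  · intro b hb
    rcases List.mem_map.1 hb with ⟨k, hk, rfl⟩
    have := List.mem_range.1 hk
    omega

-- A as a map of maps over Nat ranges
lemma transform_multigram_eq (sentence : List String) (nn : Nat) :
    transform_multigram sentence (nn : Int) =
      (List.range ((sentence.length + 1) - nn)).map
        (fun k => (List.range nn).map (fun t => sentence.getD (k + t) "")) := by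
  unfold transform_multigram
  simp only [PySem.List.foldl_append_singleton_eq_map, List.nil_append,
    PySem.List.pyRange_one]
  apply List.ext_getElem
  · simp; omega
  · intro i h1 h2
    simp only [List.getElem_map, List.getElem_range]
    apply List.ext_getElem
  -- inner lists
    · simp
    · intro t t1 t2
      simp only [List.getElem_map, List.getElem_range]
      have hcast : (0 : Int) + (i : Int) + (t : Int) = ((i + t : Nat) : Int) := by push_cast; ring
      rw [hcast, PySem.List.pyGetD_natCast]

-- B as the same map of maps (rows transposed)
lemma transform_multigram_alt_eq (sentence : List String) (nn : Nat) (h : 1 ≤ nn) :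
    transform_multigram_alt sentence (nn : Int) =
      (List.range ((sentence.length + 1) - nn)).map
        (fun k => (List.range nn).map (fun t => sentence.getD (k + t) "")) := by
  unfold transform_multigram_alt pyZipStar
  by_cases hbig : (sentence.length : Int) < (nn : Int)
  · rw [if_pos hbig]
    have : (sentence.length + 1) - nn = 0 := by omega
    rw [this, List.range_zero, List.map_nil]
  rw [if_neg hbig]
  have hvs : (PySem.List.pyRange 0 (nn : Int) 1).map
      (fun i => PySem.List.slice sentence (some i) none) =
      (List.range nn).map (fun k => sentence.drop k) := by
    rw [PySem.List.pyRange_one]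
    simp only [List.map_map, Int.sub_zero, Int.toNat_natCast]
    apply List.map_congr_left
    intro k _
    simp [PySem.List.slice_from_natCast]
  rw [hvs]
  have hlen : (((List.range nn).map (fun k => sentence.drop k)).map List.length).min?
      = some (sentence.length - (nn - 1)) := by
    rw [List.map_map]
    have : (List.length ∘ fun k => sentence.drop k) = fun k => sentence.length - k := by
      funext k; simp
    rw [this, min?_range_sub _ _ h]
  rw [hlen]
  have hm : sentence.length - (nn - 1) = (sentence.length + 1) - nn := by omega
  rw [hm]
  apply List.map_congr_left
  intro k _
  rw [List.map_map]
  apply List.map_congr_left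
  intro t _
  simp [List.getD, Nat.add_comm k t]

-- ===== VERDICT (by name: the statement is the Claim_ definition above) =====
theorem transform_multigram_spec : Claim_equal_transform_multigram := by
  intro sentence n _ hpre
  unfold Spec_transform_multigram
  have hn : n = ((n.toNat : Nat) : Int) := by
    have : (1 : Int) ≤ n := hpre
    omega
  rw [hn, transform_multigram_eq, transform_multigram_alt_eq]
  have : (1 : Int) ≤ n := hpre
  omega
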